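-- pv_equiv track=rewrite | github.com/rhythm-semwal/DS-Algo | Bit Manipulation/interesting array.py | solve
-- ===== SOURCE A (Python) =====
-- def solve(A):
--     # approach 1
--     # if the xor is even then return yes else return true
--     # if len(A) == 1:
--     #     return "No"
--     # xor = A[0]
--     # for i in range(1, len(A)):
--     #     xor ^= A[i]
--
--     # if xor & 1 == 0:
--     #     return "Yes"
--     # return "No"
--
--     # approach 2
--     count = 0
--     # if the number of odd numbers are even return yes else no
--     # bcoz even number can be splited into equal half and there XOR is 0
--     # for odd numbers, if the number of odd number is even then there XOR will be 0
--     for i in A: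
--         if i % 2:
--             count += 1
--     if count % 2 == 0:
--         return "Yes"
--     return "No"
-- ===== SOURCE B (Python) =====
-- def solve(A):
--     # Divide and conquer: the parity of odd numbers in A is the XOR of the
--     # parities of the two halves; recurse on halves instead of looping.
--     def odd_parity(xs):
--         if len(xs) <= 1:
--             return bool(xs) and xs[0] % 2 != 0
--         mid = len(xs) // 2
--         return odd_parity(xs[:mid]) != odd_parity(xs[mid:])
--     return "No" if odd_parity(A) else "Yes"
-- ===== Notes on version B (the rewrite author's own statement) =====
-- stated objective: alternative
-- what changed: Replaces the linear odd-counting loop with a divide-and-conquer recursion that splits the list in half and XORs the odd-count parities of the halves, never maintaining a counter.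
import Mathlib
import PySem

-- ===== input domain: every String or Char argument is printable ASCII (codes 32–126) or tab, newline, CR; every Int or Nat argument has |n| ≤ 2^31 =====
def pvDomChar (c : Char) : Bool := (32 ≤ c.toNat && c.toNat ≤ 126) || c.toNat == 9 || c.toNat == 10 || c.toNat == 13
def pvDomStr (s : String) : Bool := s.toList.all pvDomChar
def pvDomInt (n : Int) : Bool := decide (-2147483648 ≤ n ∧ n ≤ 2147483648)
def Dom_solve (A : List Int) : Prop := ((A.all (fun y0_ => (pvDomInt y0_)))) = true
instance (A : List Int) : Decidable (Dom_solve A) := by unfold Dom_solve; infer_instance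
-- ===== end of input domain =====

-- B replaces A's odd-counting loop by a divide-and-conquer recursion XOR-ing the odd-count parities of the two halves (alternative decomposition, not faster).


-- ===== PORT A =====
def solve (A : List Int) : String :=
  let count := A.foldl (fun count i => if PySem.Int.mod i 2 ≠ 0 then count + 1 else count) (0 : Int)
  if PySem.Int.mod count 2 = 0 then "Yes" else "No"

-- ===== PORT B =====
-- xs[:mid] / xs[mid:] with 0 ≤ mid ≤ len(xs) are exactly List.take / List.drop
def oddParity : List Int → Bool
  | [] => false
  | [x] => decide (PySem.Int.mod x 2 ≠ 0)
  | a :: b :: t =>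
    let mid := (a :: b :: t).length / 2
    oddParity ((a :: b :: t).take mid) != oddParity ((a :: b :: t).drop mid)
termination_by xs => xs.length
decreasing_by
  · simp only [List.length_take, List.length_cons]; omega
  · simp only [List.length_drop, List.length_cons]; omega

def solve_alt (A : List Int) : String := if oddParity A then "No" else "Yes"

-- ===== PRECONDITION & SPEC =====
def Spec_solve (A : List Int) (out : String) : Prop := out = solve_alt A
instance (A : List Int) (out : String) : Decidable (Spec_solve A out) := by unfold Spec_solve; infer_instance

-- ===== CLAIM (what is proved, stated in full; the proofs are below) =====
def Claim_equal_solve : Prop := ∀ (A : List Int), Dom_solve A → Spec_solve A (solve A)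

-- ===== LEMMAS AND PROOFS =====

def oddCount (xs : List Int) : Nat := xs.countP (fun i => decide (PySem.Int.mod i 2 ≠ 0))

theorem oddParity_eq (xs : List Int) : oddParity xs = decide (oddCount xs % 2 = 1) := by
  fun_induction oddParity xs with
  | case1 => simp [oddCount]
  | case2 x =>
    have hm : PySem.Int.mod x 2 = x % 2 := PySem.Int.mod_eq_emod_of_pos (by norm_num)
    have h2 : x % 2 = 0 ∨ x % 2 = 1 := by omega
    simp only [oddCount, List.countP_cons, List.countP_nil, hm]
    rcases h2 with h | h <;> simp [h]
  | case3 a b t mid ih1 ih2 =>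
    rw [ih1, ih2]
    have hsplit : oddCount ((a :: b :: t).take ((a :: b :: t).length / 2)) +
        oddCount ((a :: b :: t).drop ((a :: b :: t).length / 2)) = oddCount (a :: b :: t) := by
      unfold oddCount
      rw [← List.countP_append, List.take_append_drop]
    set c1 := oddCount ((a :: b :: t).take ((a :: b :: t).length / 2))
    set c2 := oddCount ((a :: b :: t).drop ((a :: b :: t).length / 2))
    by_cases h1 : c1 % 2 = 1 <;> by_cases h2 : c2 % 2 = 1 <;>
      simp [h1, h2] <;> omega

theorem foldl_count (xs : List Int) (c : Int) :
    xs.foldl (fun count i => if PySem.Int.mod i 2 ≠ 0 then count + 1 else count) c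
      = c + (oddCount xs : Int) := by
  induction xs generalizing c with
  | nil => simp [oddCount]
  | cons x t ih =>
    simp only [List.foldl_cons, ih, oddCount, List.countP_cons]
    by_cases h : x % 2 = 1 <;> simp [h] <;> push_cast <;> ring

theorem solve_spec : Claim_equal_solve := by
  intro A _
  unfold Spec_solve solve solve_alt
  have hmod : PySem.Int.mod ((0:Int) + (oddCount A : Int)) 2 = ((oddCount A % 2 : Nat) : Int) := by
    rw [PySem.Int.mod_eq_emod_of_pos (by norm_num)]
    push_cast
    omega
  simp only [foldl_count, oddParity_eq, hmod]
  by_cases h : oddCount A % 2 = 1 <;> simp [h] <;> omega
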